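-- pv_equiv track=rewrite | github.com/HS587885/Baekjoon-Programmers | 프로그래머스/2/17687. ［3차］ n진수 게임/［3차］ n진수 게임.py | solution
-- ===== SOURCE A (Python) =====
-- def convert(number, n):
--     if number == 0:
--         return '0'
--     NUMBERS = "0123456789ABCDEF"
--     res = ""
--     while number > 0:
--         number, mod = divmod(number, n)
--         res += NUMBERS[mod]
--     return res[::-1]
--
-- def solution(n, t, m, p):
--     answer = ''
--     game = ''
--     cur = p - 1
--     for num in range(t * m):
--         game += convert(num, n)
--     while len(answer) < t:
--         answer += game[cur]
--         cur += m
--     return answer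
-- ===== SOURCE B (Python) =====
-- def convert(number, n):
--     if number == 0:
--         return '0'
--     NUMBERS = "0123456789ABCDEF"
--     res = ""
--     while number > 0:
--         number, mod = divmod(number, n)
--         res += NUMBERS[mod]
--     return res[::-1]
--
-- def solution(n, t, m, p):
--     # Single interleaved pass: stream digits number by number, keeping a
--     # running global digit index, and collect player p's digits on the fly.
--     answer = []
--     idx = 0
--     target = p - 1
--     for num in range(t * m):
--         if len(answer) == t:
--             break
--         for d in convert(num, n):
--             if idx >= target and (idx - target) % m == 0 and len(answer) < t:
--                 answer.append(d)
--             idx += 1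
--     return ''.join(answer)
-- ===== Notes on version B (the rewrite author's own statement) =====
-- stated objective: alternative
-- what changed: Instead of building the full concatenated base-n string and then striding over it in a second pass, B streams the digits of each number in one interleaved pass, keeping a running global digit index and appending a digit only when its index is congruent to p-1 modulo m, breaking as soon as t digits are collected; no intermediate string is built.
-- outside the precondition, e.g. on solution(3, 3, 3, -3): A returns '222', B returns '212'; on solution(100, 5, 2, 1): A returns '02468', B returns '02468'; on solution(2, 2, 2, 3): A returns '11', B returns '11'
import Mathlib
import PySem

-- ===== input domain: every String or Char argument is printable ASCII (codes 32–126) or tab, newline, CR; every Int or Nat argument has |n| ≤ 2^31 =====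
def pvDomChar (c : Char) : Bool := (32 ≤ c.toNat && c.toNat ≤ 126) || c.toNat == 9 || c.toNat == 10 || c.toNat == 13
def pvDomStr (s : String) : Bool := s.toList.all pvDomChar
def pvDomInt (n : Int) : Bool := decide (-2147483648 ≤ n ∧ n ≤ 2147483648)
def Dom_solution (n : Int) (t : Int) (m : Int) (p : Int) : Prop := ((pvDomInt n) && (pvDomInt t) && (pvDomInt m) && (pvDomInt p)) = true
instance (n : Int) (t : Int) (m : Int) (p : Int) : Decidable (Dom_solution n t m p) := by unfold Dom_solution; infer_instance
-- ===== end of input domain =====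

-- B streams the base-n digits in one interleaved pass with a running global
-- digit index instead of building the full concatenated string and striding
-- over it in a second pass; no intermediate string, early break.

-- ===== PORT A =====
-- shared helper: Python's convert(number, n), used verbatim by A and by B.
-- NUMBERS[mod]: ported via pyGetD (Python raises IndexError out of range;
-- under Pre_ the digit value is always in range, so the default is unreachable).
def pyNUMBERS : List Char := "0123456789ABCDEF".toList

-- the while loop of convert; fuel = number.toNat bounds the iteration count
-- (for n ≥ 2 the quotient strictly decreases and stays nonnegative).
def convertLoop : Nat → Int → Int → List Char → List Char
  | 0, _, _, res => res
  | fuel + 1, number, n, res =>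
    if 0 < number then
      convertLoop fuel (PySem.Int.floordiv number n) n
        (res ++ [PySem.List.pyGetD pyNUMBERS (PySem.Int.mod number n) '0'])
    else res

def convert (number : Int) (n : Int) : List Char :=
  if number = 0 then ['0']
  else (convertLoop number.toNat number n []).reverse

-- the while loop of A: answer += game[cur]; cur += m, until len(answer) ≥ t.
-- Each iteration adds one character, so fuel = t.toNat suffices exactly.
-- (game[cur] out of range is Python's IndexError: excluded by Pre_.)
def strideA (game : List Char) (t m : Int) : Nat → List Char → Int → List Char
  | 0, answer, _ => answer
  | fuel + 1, answer, cur =>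
    if (answer.length : Int) < t then
      match PySem.List.pyGet? game cur with
      | some c => strideA game t m fuel (answer ++ [c]) (cur + m)
      | none => answer
    else answer

def solution (n : Int) (t : Int) (m : Int) (p : Int) : String :=
  -- game is the foldl-concatenation below (Python's game variable, inlined)
  String.mk (strideA ((PySem.List.pyRange 0 (t * m) 1).foldl (fun g num => g ++ convert num n) [])
    t m t.toNat [] (p - 1))

-- ===== PORT B =====
-- one digit of the stream: append it iff its global index idx selects player p
-- and the answer is not yet full; idx always advances.
def stepB (t m target : Int) (st : List Char × Int) (d : Char) : List Char × Int :=
  if target ≤ st.2 ∧ PySem.Int.mod (st.2 - target) m = 0 ∧ (st.1.length : Int) < t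
  then (st.1 ++ [d], st.2 + 1)
  else (st.1, st.2 + 1)

-- the for-loop over num in range(t*m) with the early break once len(answer)=t
def outerB (n t m target : Int) : List Int → List Char × Int → List Char × Int
  | [], st => st
  | num :: rest, st =>
    if (st.1.length : Int) = t then st
    else outerB n t m target rest ((convert num n).foldl (stepB t m target) st)

def solution_alt (n : Int) (t : Int) (m : Int) (p : Int) : String :=
  String.mk (outerB n t m (p - 1) (PySem.List.pyRange 0 (t * m) 1) ([], 0)).1

-- ===== PRECONDITION & SPEC =====
-- First disjunct: with t ≤ 0 and t*m ≤ 0 both loops of A are skipped and it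
-- returns '' for ANY n, m, p.  Otherwise Pre_ excludes n outside 2..16
-- (convert loops forever for n = 1, raises ZeroDivisionError/IndexError for
-- n ≤ 0 or n > 16 — except accidentally for tiny t*m, where both programs
-- return the same string), and m < 1 or p outside 1..m (game[cur] raises
-- IndexError — again except accidentally for inputs where the game string
-- happens to be long enough; for p ≤ 0 A's accidental value comes from
-- Python's negative-index wraparound into the game string, a corner no one
-- would specify, and B's forward-only stream naturally starts at digit 0).
def Pre_solution (n : Int) (t : Int) (m : Int) (p : Int) : Prop :=
  (t ≤ 0 ∧ t * m ≤ 0) ∨ (2 ≤ n ∧ n ≤ 16 ∧ 1 ≤ m ∧ 1 ≤ p ∧ p ≤ m)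
instance (n : Int) (t : Int) (m : Int) (p : Int) : Decidable (Pre_solution n t m p) := by
  unfold Pre_solution; infer_instance

def pvWitness_solution : Int × Int × Int × Int := (2, 4, 3, 2)

def Spec_solution (n : Int) (t : Int) (m : Int) (p : Int) (out : String) : Prop :=
  out = solution_alt n t m p
instance (n : Int) (t : Int) (m : Int) (p : Int) (out : String) : Decidable (Spec_solution n t m p out) := by
  unfold Spec_solution; infer_instance

-- ===== CLAIM (what is proved, stated in full; the proofs are below) =====
def Claim_equal_solution : Prop := ∀ (n : Int) (t : Int) (m : Int) (p : Int),
  Dom_solution n t m p → Pre_solution n t m p → Spec_solution n t m p (solution n t m p)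

-- ===== LEMMAS AND PROOFS =====

-- reference selection: the characters game[cur], game[cur+m], …, rem of them,
-- stopping early when the index leaves the list.
def refSel (game : List Char) (m : Int) (cur rem : Int) : List Char :=
  if 0 < rem then
    match PySem.List.pyGet? game cur with
    | some c => c :: refSel game m (cur + m) (rem - 1)
    | none => []
  else []
termination_by rem.toNat
decreasing_by omega

-- streaming selection: scan ds position by position from global index idx,
-- keeping a char iff its index is ≥ target and ≡ target (mod m), first rem of them.
def pick (m target : Int) : List Char → Int → Int → List Char
  | [], _, _ => []
  | d :: ds, idx, rem =>
    if target ≤ idx ∧ PySem.Int.mod (idx - target) m = 0 ∧ 0 < rem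
    then d :: pick m target ds (idx + 1) (rem - 1)
    else pick m target ds (idx + 1) rem

theorem refSel_nonpos (game : List Char) (m cur rem : Int) (h : rem ≤ 0) :
    refSel game m cur rem = [] := by
  unfold refSel; simp [show ¬ 0 < rem by omega]

theorem pick_nonpos (m target : Int) (ds : List Char) (idx rem : Int) (h : rem ≤ 0) :
    pick m target ds idx rem = [] := by
  induction ds generalizing idx with
  | nil => rfl
  | cons d ds ih =>
    unfold pick
    rw [if_neg (by rintro ⟨-, -, h3⟩; omega)]
    exact ih _

-- A's while loop computes the reference selection.
theorem strideA_eq_refSel (game : List Char) (t m : Int) :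
    ∀ (fuel : Nat) (answer : List Char) (cur : Int),
      t - (answer.length : Int) ≤ (fuel : Int) →
      strideA game t m fuel answer cur = answer ++ refSel game m cur (t - answer.length) := by
  intro fuel
  induction fuel with
  | zero =>
    intro answer cur h
    simp [strideA, refSel_nonpos game m cur _ (by omega)]
  | succ fuel ih =>
    intro answer cur h
    unfold strideA
    by_cases hlt : (answer.length : Int) < t
    · rw [if_pos hlt]
      rcases hg : PySem.List.pyGet? game cur with - | c
      · rw [refSel, if_pos (by omega), hg]; simp
      · rw [refSel, if_pos (by omega), hg]
        dsimp only
        rw [ih (answer ++ [c]) (cur + m) (by simp; omega),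
          show ((answer ++ [c]).length : Int) = (answer.length : Int) + 1 by simp,
          show t - ((answer.length : Int) + 1) = t - (answer.length : Int) - 1 by omega]
        simp
    · rw [if_neg hlt, refSel_nonpos game m cur _ (by omega)]
      simp

-- once the answer is full, stepB never changes it.
theorem foldl_stepB_full (t m target : Int) :
    ∀ (ds : List Char) (st : List Char × Int), ¬ (st.1.length : Int) < t →
      (ds.foldl (stepB t m target) st).1 = st.1 := by
  intro ds
  induction ds with
  | nil => intro st _; rfl
  | cons d ds ih =>
    intro st hst
    rw [List.foldl_cons, stepB, if_neg (by rintro ⟨-, -, h3⟩; exact hst h3)]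
    exact ih _ hst

-- the outer loop with its early break equals the plain fold over the flattened
-- digit stream, as far as the answer component is concerned.
theorem outerB_eq_foldl (n t m target : Int) :
    ∀ (nums : List Int) (st : List Char × Int),
      (outerB n t m target nums st).1 =
        ((nums.flatMap (fun num => convert num n)).foldl (stepB t m target) st).1 := by
  intro nums
  induction nums with
  | nil => intro st; rfl
  | cons num rest ih =>
    intro st
    rw [outerB, List.flatMap_cons, List.foldl_append]
    by_cases hfull : (st.1.length : Int) = t
    · rw [if_pos hfull]
      rw [foldl_stepB_full t m target _ _ (by
          rw [foldl_stepB_full t m target _ st (by omega)]; omega)]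
      exact (foldl_stepB_full t m target _ st (by omega)).symm
    · rw [if_neg hfull]; exact ih _

-- the fold of stepB is the streaming selection appended to the answer.
theorem foldl_stepB_eq_pick (t m target : Int) :
    ∀ (ds : List Char) (answer : List Char) (idx : Int),
      ds.foldl (stepB t m target) (answer, idx) =
        (answer ++ pick m target ds idx (t - answer.length), idx + ds.length) := by
  intro ds
  induction ds with
  | nil => intro answer idx; simp [pick]
  | cons d ds ih =>
    intro answer idx
    rw [List.foldl_cons]
    by_cases hg : target ≤ idx ∧ PySem.Int.mod (idx - target) m = 0 ∧ (answer.length : Int) < t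
    · rw [stepB, if_pos hg, ih (answer ++ [d]) (idx + 1), pick,
        if_pos ⟨hg.1, hg.2.1, by omega⟩]
      simp; constructor
      · have : (t : Int) - (answer.length + 1) = t - answer.length - 1 := by omega
        rw [this]
      · omega
    · rw [stepB, if_neg hg, ih answer (idx + 1), pick,
        if_neg (by rintro ⟨h1, h2, h3⟩; exact hg ⟨h1, h2, by omega⟩)]
      simp; omega

-- core: streaming selection of a suffix = strided reference selection, where
-- cur is the next selectable global position at or after idx = pre.length.
theorem pick_eq_refSel (m target : Int) (hm : 1 ≤ m) :
    ∀ (ds pre : List Char) (cur rem : Int),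
      (pre.length : Int) ≤ cur → target ≤ cur → m ∣ (cur - target) →
      (cur - m < (pre.length : Int) ∨ cur = target) →
      pick m target ds (pre.length : Int) rem = refSel (pre ++ ds) m cur rem := by
  intro ds
  induction ds with
  | nil =>
    intro pre cur rem hcur htar hdvd hnear
    by_cases hrem : 0 < rem
    · rw [pick, refSel, if_pos hrem]
      have : PySem.List.pyGet? (pre ++ []) cur = none := by
        rw [PySem.List.pyGet?_eq_none_iff, PySem.Raise.InRange]
        simp; omega
      rw [this]
    · rw [pick, refSel_nonpos _ _ _ _ (by omega)]
  | cons d ds ih =>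
    intro pre cur rem hcur htar hdvd hnear
    by_cases hrem : 0 < rem
    · by_cases heq : (pre.length : Int) = cur
      · -- the current position is selected
        rw [← heq] at htar hdvd
        rw [← heq]
        rw [pick, if_pos ⟨htar, by rw [PySem.Int.mod_eq_zero_iff_dvd]; exact hdvd, hrem⟩]
        rw [refSel, if_pos hrem, PySem.List.pyGet?_append_length]
        dsimp only
        have hrec := ih (pre ++ [d]) ((pre.length : Int) + m) (rem - 1)
          (by simp; omega) (by omega) (by
            have : (pre.length : Int) + m - target = ((pre.length : Int) - target) + m := by ring
            rw [this]; exact dvd_add hdvd dvd_rfl)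
          (by left; simp)
        simp only [List.length_append, List.length_singleton] at hrec
        rw [List.append_assoc] at hrec
        simp only [List.singleton_append] at hrec
        rw [show ((pre.length + 1 : Nat) : Int) = (pre.length : Int) + 1 by push_cast; ring] at hrec
        rw [hrec]
      · -- idx < cur: the current position is skipped
        have hidx : (pre.length : Int) < cur := by omega
        rw [pick, if_neg (by
          rintro ⟨h1, h2, -⟩
          rw [PySem.Int.mod_eq_zero_iff_dvd] at h2
          -- m divides both cur - target and pre.length - target, hence cur - pre.length,
          -- but 0 < cur - pre.length < m (from hnear): contradiction
          have hd : m ∣ (cur - (pre.length : Int)) := by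
            have : cur - (pre.length : Int) = (cur - target) - ((pre.length : Int) - target) := by ring
            rw [this]; exact dvd_sub hdvd h2
          rcases hnear with hnear | hnear
          · have := Int.le_of_dvd (by omega) hd; omega
          · omega)]
        have hrec := ih (pre ++ [d]) cur rem (by simp; omega) htar hdvd
          (by rcases hnear with hnear | hnear
              · left; simp; omega
              · right; exact hnear)
        simp only [List.length_append, List.length_singleton] at hrec
        rw [List.append_assoc] at hrec
        simp only [List.singleton_append] at hrec
        rw [show ((pre.length + 1 : Nat) : Int) = (pre.length : Int) + 1 by push_cast; ring] at hrec
        rw [hrec]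
    · rw [pick_nonpos _ _ _ _ _ (by omega), refSel_nonpos _ _ _ _ (by omega)]

-- ===== VERDICT (by name: the statement is the Claim_ definition above) =====
theorem solution_spec : Claim_equal_solution := by
  intro n t m p _ hpre
  rcases hpre with ⟨ht, htm⟩ | ⟨-, -, hm, hp, -⟩
  · -- empty game: both return ""
    simp [Spec_solution, solution, solution_alt,
      PySem.List.pyRange_one_eq_nil (show t * m ≤ 0 by omega),
      show t.toNat = 0 by omega, strideA, outerB]
  unfold Spec_solution solution solution_alt
  rw [PySem.List.foldl_append_eq_flatMap, List.nil_append]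
  set G := (PySem.List.pyRange 0 (t * m) 1).flatMap (fun num => convert num n) with hG
  rw [strideA_eq_refSel G t m t.toNat [] (p - 1) (by simp)]
  rw [outerB_eq_foldl, foldl_stepB_eq_pick]
  have hpr := pick_eq_refSel m (p - 1) hm G [] (p - 1) t
    (by simp; omega) le_rfl (by simp) (Or.inr rfl)
  simp only [List.length_nil, Nat.cast_zero, List.nil_append, sub_zero, ← hG] at hpr ⊢
  rw [hpr]
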